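-- pv_equiv track=rewrite | github.com/shoark7/algorithm-with-python | problems_solving/algospot/strjoin.py | strjoin
-- ===== SOURCE A (Python) =====
-- def strjoin(lens):
--     ret = 0
--     lens.sort()
--
--     while len(lens) > 1:
--         a = lens.pop(0)
--         b = lens.pop(0)
--         ret += a + b
--         lens.append(a + b)
--         lens.sort()
--     return ret
-- ===== SOURCE B (Python) =====
-- def strjoin(lens):
--     # Return-value equivalent to A; does not mutate its argument (A sorts/empties lens in place).
--     # q[i:] is the live queue, kept sorted; the two front elements are consumed by advancing i,
--     # and each merged sum is spliced back at its binary-search position instead of A's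
--     # double pop(0) + full re-sort.
--     q = sorted(lens)
--     ret = 0
--     i = 0
--     while len(q) - i > 1:
--         s = q[i] + q[i + 1]
--         i += 2
--         ret += s
--         lo, hi = i, len(q)
--         while lo < hi:
--             mid = (lo + hi) // 2
--             if q[mid] <= s:
--                 lo = mid + 1
--             else:
--                 hi = mid
--         q.insert(lo, s)
--     return ret
-- ===== Notes on version B (the rewrite author's own statement) =====
-- stated objective: faster
-- what changed: B sorts once, consumes the two front elements by advancing an index, and splices each merged sum back at its binary-search position in place, instead of A's two O(n) pop(0) calls plus a full re-sort of the whole list on every iteration.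
import Mathlib
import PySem

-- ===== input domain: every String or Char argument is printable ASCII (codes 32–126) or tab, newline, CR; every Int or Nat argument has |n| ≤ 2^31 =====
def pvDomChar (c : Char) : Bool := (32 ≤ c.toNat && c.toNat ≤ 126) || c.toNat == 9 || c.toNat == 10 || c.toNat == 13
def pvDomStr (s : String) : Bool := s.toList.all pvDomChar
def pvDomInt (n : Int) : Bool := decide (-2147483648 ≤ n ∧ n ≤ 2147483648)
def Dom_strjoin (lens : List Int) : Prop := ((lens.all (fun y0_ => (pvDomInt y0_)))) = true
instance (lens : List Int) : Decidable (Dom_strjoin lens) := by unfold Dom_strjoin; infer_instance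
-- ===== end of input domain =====

-- B sorts once and then keeps the queue sorted itself: it consumes the two front elements by
-- advancing an index and splices each merged sum back at its binary-search position, instead of
-- A's double pop(0) + full re-sort per iteration (return value only: A sorts/empties its
-- argument list in place, B leaves it untouched).

-- ===== PORT A =====
-- while len(lens) > 1: a = lens.pop(0); b = lens.pop(0); ret += a+b; lens.append(a+b); lens.sort()
def strjoinLoop : List Int → Int → Int
  | a :: b :: rest, ret =>
      strjoinLoop (PySem.List.sorted (rest ++ [a + b]) (fun x => x) false) (ret + (a + b))
  | _, ret => ret
  termination_by lens _ => lens.length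
  decreasing_by simp [PySem.List.length_sorted]

def strjoin (lens : List Int) : Int :=
  -- ret = 0; lens.sort(); loop
  strjoinLoop (PySem.List.sorted lens (fun x => x) false) 0

-- ===== PORT B =====
-- inner loop: lo, hi = i, len(q); while lo < hi: mid = (lo+hi)//2; if q[mid] <= s: lo = mid+1 else hi = mid
-- (q[mid] is always in range here: mid < hi ≤ len(q), so getD's default is never used)
def bsearchB (q : List Int) (s : Int) (lo hi : Nat) : Nat :=
  if lo < hi then
    let mid := (lo + hi) / 2
    if q.getD mid 0 ≤ s then bsearchB q s (mid + 1) hi else bsearchB q s lo mid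
  else lo
  termination_by hi - lo
  decreasing_by all_goals omega

-- outer loop over (q, i, ret): while len(q) - i > 1: s = q[i] + q[i+1]; i += 2; ret += s; q.insert(lo, s)
def strjoinAltLoop (q : List Int) (i : Nat) (ret : Int) : Int :=
  if i + 1 < q.length then
    let s := q.getD i 0 + q.getD (i + 1) 0
    let j := bsearchB q s (i + 2) q.length
    strjoinAltLoop (PySem.List.insert q (Int.ofNat j) s) (i + 2) (ret + s)
  else ret
  termination_by q.length - i
  decreasing_by simp [PySem.List.length_insert]; omega

def strjoin_alt (lens : List Int) : Int :=
  strjoinAltLoop (PySem.List.sorted lens (fun x => x) false) 0 0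

-- ===== PRECONDITION & SPEC =====
def Spec_strjoin (lens : List Int) (out : Int) : Prop := out = strjoin_alt lens
instance (lens : List Int) (out : Int) : Decidable (Spec_strjoin lens out) := by unfold Spec_strjoin; infer_instance

-- ===== CLAIM (what is proved, stated in full; the proofs are below) =====
def Claim_equal_strjoin : Prop := ∀ (lens : List Int), Dom_strjoin lens → Spec_strjoin lens (strjoin lens)

-- ===== LEMMAS AND PROOFS =====

-- Python's list.insert at an in-range nonnegative index is take/drop splicing
theorem insert_eq_splice (q : List Int) (j : Nat) (s : Int) (hj : j ≤ q.length) :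
    PySem.List.insert q (Int.ofNat j) s = q.take j ++ s :: q.drop j := by
  simp only [PySem.List.insert, PySem.List.sliceIndices]
  norm_num
  rw [if_neg (show ¬ ((j : Int) < 0) by omega)]
  have hmin : min (j : Int) (q.length : Int) = (j : Int) := by omega
  rw [hmin, Int.toNat_natCast]

-- monotonicity of getD over the sorted suffix q.drop b
theorem getD_mono {q : List Int} {b : Nat} (hs : (q.drop b).Pairwise (· ≤ ·))
    {k m : Nat} (hbk : b ≤ k) (hkm : k ≤ m) (hm : m < q.length) :
    q.getD k 0 ≤ q.getD m 0 := by
  have hk : k < q.length := lt_of_le_of_lt hkm hm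
  rw [List.getD_eq_getElem q 0 hk, List.getD_eq_getElem q 0 hm]
  rcases Nat.lt_or_ge k m with hlt | hge
  · have hd := (List.pairwise_iff_getElem).mp hs (k - b) (m - b)
      (by rw [List.length_drop]; omega) (by rw [List.length_drop]; omega) (by omega)
    simpa [List.getElem_drop, Nat.add_sub_cancel' hbk,
      Nat.add_sub_cancel' (le_trans hbk hkm)] using hd
  · have : k = m := by omega
    subst this; exact le_refl _

-- the binary search returns j with b ≤ j ≤ len, q[k] ≤ s for b ≤ k < j, s < q[k] for j ≤ k < len
theorem bsearchB_spec (q : List Int) (s : Int) (b : Nat)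
    (hs : (q.drop b).Pairwise (· ≤ ·)) :
    ∀ lo hi, b ≤ lo → lo ≤ hi → hi ≤ q.length →
    (∀ k, b ≤ k → k < lo → q.getD k 0 ≤ s) →
    (∀ k, hi ≤ k → k < q.length → s < q.getD k 0) →
    b ≤ bsearchB q s lo hi ∧ bsearchB q s lo hi ≤ q.length ∧
    (∀ k, b ≤ k → k < bsearchB q s lo hi → q.getD k 0 ≤ s) ∧
    (∀ k, bsearchB q s lo hi ≤ k → k < q.length → s < q.getD k 0) := by
  have main : ∀ (fuel lo hi : Nat), hi - lo ≤ fuel → b ≤ lo → lo ≤ hi → hi ≤ q.length →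
      (∀ k, b ≤ k → k < lo → q.getD k 0 ≤ s) →
      (∀ k, hi ≤ k → k < q.length → s < q.getD k 0) →
      b ≤ bsearchB q s lo hi ∧ bsearchB q s lo hi ≤ q.length ∧
      (∀ k, b ≤ k → k < bsearchB q s lo hi → q.getD k 0 ≤ s) ∧
      (∀ k, bsearchB q s lo hi ≤ k → k < q.length → s < q.getD k 0) := by
    intro fuel
    induction fuel with
    | zero =>
        intro lo hi hf hb hlh hhl h1 h2
        have heq : ¬ lo < hi := by omega
        rw [bsearchB, if_neg heq]
        exact ⟨hb, le_trans hlh hhl, h1, fun k hk1 hk2 => h2 k (by omega) hk2⟩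
    | succ f ih =>
        intro lo hi hf hb hlh hhl h1 h2
        rw [bsearchB]
        by_cases hlt : lo < hi
        · rw [if_pos hlt]
          have hmid1 : lo ≤ (lo + hi) / 2 := by omega
          have hmid2 : (lo + hi) / 2 < hi := by omega
          by_cases hcmp : q.getD ((lo + hi) / 2) 0 ≤ s
          · rw [if_pos hcmp]
            apply ih ((lo + hi) / 2 + 1) hi (by omega) (by omega) (by omega) hhl
            · intro k hk1 hk2
              rcases Nat.lt_or_ge k lo with hklo | hklo
              · exact h1 k hk1 hklo
              · exact le_trans (getD_mono hs hk1 (by omega) (by omega)) hcmp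
            · exact h2
          · rw [if_neg hcmp]
            rw [not_le] at hcmp
            apply ih lo ((lo + hi) / 2) (by omega) hb (by omega) (by omega) h1
            intro k hk1 hk2
            exact lt_of_lt_of_le hcmp (getD_mono hs (by omega) hk1 hk2)
        · rw [if_neg hlt]
          exact ⟨hb, le_trans hlh hhl, h1, fun k hk1 hk2 => h2 k (by omega) hk2⟩
  intro lo hi hb hlh hhl h1 h2
  exact main (hi - lo) lo hi le_rfl hb hlh hhl h1 h2

-- after splicing s at the found position, the suffix beyond i+2 is exactly A's re-sorted queue
theorem splice_drop_eq_sorted (q : List Int) (i : Nat) (s : Int)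
    (hlen : i + 1 < q.length) (hs : (q.drop i).Pairwise (· ≤ ·)) :
    (PySem.List.insert q (Int.ofNat (bsearchB q s (i + 2) q.length)) s).drop (i + 2) =
      PySem.List.sorted (q.drop (i + 2) ++ [s]) (fun x => x) false := by
  have hd2 : (q.drop (i + 2)).Pairwise (· ≤ ·) := by
    have : q.drop (i + 2) = (q.drop i).drop 2 := by rw [List.drop_drop]
    rw [this]
    exact hs.sublist (List.drop_sublist 2 (q.drop i))
  obtain ⟨hbj, hjlen, h1, h2⟩ := bsearchB_spec q s (i + 2) hd2 (i + 2) q.length le_rfl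
    (by omega) le_rfl (fun k hk1 hk2 => absurd hk2 (by omega))
    (fun k hk1 hk2 => absurd hk1 (by omega))
  set j := bsearchB q s (i + 2) q.length with hj
  set m := j - (i + 2) with hm
  rw [insert_eq_splice q j s hjlen]
  have htl : (q.take j).length = j := by simp [List.length_take]; exact hjlen
  rw [List.drop_append_of_le_length (by omega)]
  have e1 : (q.take j).drop (i + 2) = (q.drop (i + 2)).take m := by
    rw [List.drop_take]
  have e2 : q.drop j = (q.drop (i + 2)).drop m := by
    rw [List.drop_drop]; congr 1; omega
  rw [e1, e2]
  symm
  apply PySem.List.sorted_id_eq_of_perm_of_pairwise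
  · refine List.Perm.trans List.perm_middle ?_
    rw [List.take_append_drop]
    exact (List.perm_append_singleton s (q.drop (i + 2))).symm
  · have idx_take : ∀ x ∈ (q.drop (i + 2)).take m, x ≤ s := by
      intro x hx
      obtain ⟨u, hu, hxu⟩ := List.getElem_of_mem hx
      have hum : u < m := by
        have h := hu; rw [List.length_take] at h; omega
      have hulen : i + 2 + u < q.length := by
        have h := hu; rw [List.length_take, List.length_drop] at h; omega
      have : x = q.getD (i + 2 + u) 0 := by
        rw [List.getD_eq_getElem q 0 hulen, ← hxu, List.getElem_take, List.getElem_drop]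
      rw [this]
      exact h1 (i + 2 + u) (by omega) (by omega)
    have idx_drop : ∀ y ∈ (q.drop (i + 2)).drop m, s < y := by
      intro y hy
      obtain ⟨v, hv, hyv⟩ := List.getElem_of_mem hy
      have hvlen : i + 2 + (m + v) < q.length := by
        have h := hv; rw [List.length_drop, List.length_drop] at h; omega
      have : y = q.getD (i + 2 + (m + v)) 0 := by
        rw [List.getD_eq_getElem q 0 hvlen, ← hyv, List.getElem_drop, List.getElem_drop]
      rw [this]
      exact h2 (i + 2 + (m + v)) (by omega) (by omega)
    rw [List.pairwise_append]
    refine ⟨hd2.sublist (List.take_sublist m _), ?_, ?_⟩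
    · rw [List.pairwise_cons]
      exact ⟨fun y hy => le_of_lt (idx_drop y hy), hd2.sublist (List.drop_sublist m _)⟩
    · intro x hx y hy
      rcases List.mem_cons.mp hy with rfl | hy2
      · exact idx_take x hx
      · exact le_trans (idx_take x hx) (le_of_lt (idx_drop y hy2))

theorem loops_eq : ∀ (n : Nat) (q : List Int) (i : Nat), q.length - i ≤ n →
    ∀ ret : Int, (q.drop i).Pairwise (· ≤ ·) →
    strjoinLoop (q.drop i) ret = strjoinAltLoop q i ret := by
  intro n
  induction n with
  | zero =>
      intro q i hn ret _
      have hq : q.drop i = [] := by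
        apply List.eq_nil_of_length_eq_zero
        simp [List.length_drop]; omega
      rw [hq, strjoinAltLoop, if_neg (by omega)]
      simp [strjoinLoop]
  | succ n ih =>
      intro q i hn ret hq
      by_cases hlen : i + 1 < q.length
      · have h1 : i < q.length := by omega
        have h2 : i + 1 < q.length := hlen
        have hdrop : q.drop i = q[i] :: q[i + 1] :: q.drop (i + 2) := by
          rw [List.drop_eq_getElem_cons h1, List.drop_eq_getElem_cons h2]
        have hgd : q.getD i 0 + q.getD (i + 1) 0 = q[i] + q[i + 1] := by
          rw [List.getD_eq_getElem q 0 h1, List.getD_eq_getElem q 0 h2]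
        rw [hdrop, strjoinLoop]
        rw [strjoinAltLoop, if_pos hlen]
        simp only [hgd]
        rw [← splice_drop_eq_sorted q i (q[i] + q[i + 1]) hlen hq]
        apply ih
        · rw [PySem.List.length_insert]; omega
        · rw [splice_drop_eq_sorted q i (q[i] + q[i + 1]) hlen hq]
          simpa using PySem.List.sorted_pairwise (q.drop (i + 2) ++ [q[i] + q[i + 1]]) (fun x => x)
      · rw [strjoinAltLoop, if_neg hlen]
        have : q.drop i = [] ∨ ∃ x, q.drop i = [x] := by
          rcases h : q.drop i with _ | ⟨x, _ | ⟨y, t⟩⟩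
          · exact Or.inl rfl
          · exact Or.inr ⟨x, rfl⟩
          · exfalso
            have := congrArg List.length h
            simp [List.length_drop] at this
            omega
        rcases this with h | ⟨x, h⟩ <;> rw [h] <;> simp [strjoinLoop]

-- ===== VERDICT (by name: the statement is the Claim_ definition above) =====
theorem strjoin_spec : Claim_equal_strjoin := by
  intro lens _
  unfold Spec_strjoin strjoin strjoin_alt
  have := loops_eq (PySem.List.sorted lens (fun x => x) false).length (PySem.List.sorted lens (fun x => x) false) 0 le_rfl 0
    (by simpa using PySem.List.sorted_pairwise lens (fun x => x))
  simpa using this
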